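-- pv_equiv track=rewrite | github.com/adamluo1995/ByteDance-Campus-Challenge | 0225.py | func
-- ===== SOURCE A (Python) =====
-- def func(w_arr, d_arr):
--     now = 1
--     cnt = 0
--     wd_arr = [e for e in zip(w_arr, d_arr)]
--     wd_arr.sort(key=lambda x: x[0])
--     while len(wd_arr) > 0:
--         w, d = wd_arr.pop(0)
--         if now + w <= d+1:
--             cnt += 1
--             now += w
--     return cnt
-- ===== SOURCE B (Python) =====
-- def func(w_arr, d_arr):
--     pairs = sorted(zip(w_arr, d_arr), key=lambda p: p[0])
--     now, cnt = 1, 0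
--     for w, d in pairs:
--         if now + w <= d + 1:
--             now, cnt = now + w, cnt + 1
--     return cnt
-- ===== Notes on version B (the rewrite author's own statement) =====
-- stated objective: faster
-- what changed: Replaces the destructive while-loop that pops the front of the sorted list (O(n) per pop) with a single forward pass over the sorted list carrying (now, cnt) as an accumulator.
import Mathlib
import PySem

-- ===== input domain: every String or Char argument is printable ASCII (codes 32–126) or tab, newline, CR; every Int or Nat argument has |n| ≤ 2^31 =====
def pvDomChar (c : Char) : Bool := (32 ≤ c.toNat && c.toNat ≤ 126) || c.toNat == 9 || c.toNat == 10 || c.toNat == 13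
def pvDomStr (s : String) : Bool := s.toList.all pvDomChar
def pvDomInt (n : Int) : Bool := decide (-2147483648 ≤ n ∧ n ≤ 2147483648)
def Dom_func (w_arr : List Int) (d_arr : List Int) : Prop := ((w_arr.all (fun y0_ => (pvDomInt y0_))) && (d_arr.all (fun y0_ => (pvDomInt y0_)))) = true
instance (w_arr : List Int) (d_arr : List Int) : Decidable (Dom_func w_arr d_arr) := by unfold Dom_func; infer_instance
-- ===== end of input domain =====

-- B replaces A's destructive pop(0) while-loop over the sorted list with a single
-- forward pass carrying (now, cnt) as an accumulator (asymptotically faster in a timing run).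


-- ===== PORT A =====
-- the `while len(wd_arr) > 0: w, d = wd_arr.pop(0); …` loop: pop(0) takes the head,
-- the loop's mutable state is (now, cnt)
def funcWhile : List (Int × Int) → Int → Int → Int
  | [], _, cnt => cnt
  | (w, d) :: rest, now, cnt =>
      if now + w ≤ d + 1 then funcWhile rest (now + w) (cnt + 1)
      else funcWhile rest now cnt

def func (w_arr : List Int) (d_arr : List Int) : Int :=
  funcWhile (PySem.List.sorted (w_arr.zip d_arr) (fun x => x.1) false) 1 0

-- ===== PORT B =====
def func_alt (w_arr : List Int) (d_arr : List Int) : Int :=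
  ((PySem.List.sorted (w_arr.zip d_arr) (fun p => p.1) false).foldl
      (fun s p => if s.1 + p.1 ≤ p.2 + 1 then (s.1 + p.1, s.2 + 1) else s)
      ((1 : Int), (0 : Int))).2

-- ===== PRECONDITION & SPEC =====
def Spec_func (w_arr : List Int) (d_arr : List Int) (out : Int) : Prop := out = func_alt w_arr d_arr
instance (w_arr : List Int) (d_arr : List Int) (out : Int) : Decidable (Spec_func w_arr d_arr out) := by unfold Spec_func; infer_instance

-- ===== CLAIM (what is proved, stated in full; the proofs are below) =====
def Claim_equal_func : Prop := ∀ (w_arr : List Int) (d_arr : List Int), Dom_func w_arr d_arr → Spec_func w_arr d_arr (func w_arr d_arr)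

-- ===== LEMMAS AND PROOFS =====
theorem funcWhile_eq_foldl (l : List (Int × Int)) (now cnt : Int) :
    funcWhile l now cnt =
      (l.foldl (fun s p => if s.1 + p.1 ≤ p.2 + 1 then (s.1 + p.1, s.2 + 1) else s)
        (now, cnt)).2 := by
  induction l generalizing now cnt with
  | nil => rfl
  | cons hd tl ih =>
      obtain ⟨w, d⟩ := hd
      simp only [funcWhile, List.foldl]
      by_cases h : now + w ≤ d + 1 <;> simp [h, ih]

-- ===== VERDICT (by name: the statement is the Claim_ definition above) =====
theorem func_spec : Claim_equal_func := by
  intro w_arr d_arr _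
  unfold Spec_func func func_alt
  exact funcWhile_eq_foldl _ 1 0
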